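-- pv_equiv track=rewrite | github.com/overlordgamedev/Enigma-Secure-Chat | client.py | enigma_cipher
-- ===== SOURCE A (Python) =====
-- import string
--
-- def enigma_cipher(message: str, password: str) -> str:
--     # Определение роторов и их начальных позиций
--     # rotors — это список, где каждый элемент представляет собой кортеж (проводка, метка переключения).
--     # Проводка — это строка, в которой буквы перемешаны, показывая, как ротор заменяет буквы.
--     # Метка переключения — это буква, при которой ротор переключает следующий.
--     rotors = [
--         ("EKMFLGDQVZNTOWYHXUSPAIBRCJ", "K"),
--         ("AJDKSIRUXBLHWTMCQGZNPYFVOE", "J"),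
--         ("BDFHJLCPRTXVZNYEIWGAKMUSQO", "O"),
--         ("ESOVPZJAYQUIRHXLNFTGKDCMWB", "D")
--     ]
--
--     # Рефлекторная схема — это как зеркала для сигналов, они меняют буквы по аналогии с проводкой
--     reflector = "YRUHQSLDPXNGOKMIEBFZCWVJAT"
--
--     # Приводим пароль к верхнему регистру и ограничиваем его до 4 символов
--     password = password.upper().ljust(4, 'A')[:4]
--     # Преобразует строку в список. Было QWER, стало ['Q', 'W', 'E', 'R'].
--     # Это нужно, чтобы обращаться к каждой букве отдельно.
--     positions = list(password)
--     # Создает копию позиций роторов. Это нужно, чтобы не менять оригинальный пароль т.к во время шифрования позиции будут меняться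
--     current_positions = positions.copy()
--     # Пустой объект для хранения результата
--     result = []
--
--     # Цикл означает что будет браться по одному символу из сообщения для зашифровки
--     for original_char in message:
--         # Пропускаем не-буквы (Все знаки кроме букв не шифруются)
--         if not original_char.isalpha():
--             result.append(original_char)
--             continue
--
--         # Если символ в верхнем регистре true, если в нижнем false
--         is_upper = original_char.isupper()
--         # Перевод буквы в верхний регистр
--         char = original_char.upper()
--
--         # Логика вращения роторов
--         rotate_next = True  # Флаг для переключения следующего ротора
--         for i in range(len(current_positions)):
--             if rotate_next:
--                 # Поворачиваем ротор на одну позицию (Берется текущая позиция ротора и к ней добавляется + 1)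
--                 new_pos = (string.ascii_uppercase.index(current_positions[i]) + 1) % 26
--                 # Обновляем позицию ротора в current_positions
--                 current_positions[i] = string.ascii_uppercase[new_pos]
--                 # Проверяем, нужно ли переключить следующий ротор
--                 # Если текущая позиция ротора совпадает с меткой переключения (notch),
--                 # то флаг rotate_next будет установлен в True, и следующий ротор будет сдвигаться.
--                 rotate_next = current_positions[i] == rotors[i][1]
--             else:
--                 break
--
--         processed = char
--         # Проходим по всем роторам (от первого к последнему).
--         for i in range(len(rotors)):
--             wiring = rotors[i][0]  # Проводка ротора
--             pos = current_positions[i]  # Его позиция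
--             # Определяем, на сколько ротор сдвинут относительно алфавита.
--             offset = string.ascii_uppercase.index(pos)
--             # Проход символа через ротор
--             processed = wiring[(string.ascii_uppercase.index(processed) + offset) % 26]
--
--         # Проход через рефлектор
--         processed = reflector[string.ascii_uppercase.index(processed)]
--
--         # Обратный проход через роторы
--         for i in reversed(range(len(rotors))):
--             wiring = rotors[i][0]  # Проводка ротора
--             pos = current_positions[i]  # Его позиция
--             # Определяем, на сколько ротор сдвинут относительно алфавита.
--             offset = string.ascii_uppercase.index(pos)
--             # Проход символа через ротор
--             processed = string.ascii_uppercase[(wiring.index(processed) - offset) % 26]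
--
--         # Восстанавливаем регистр
--         # Если is_upper == True, то тогда буква остается в верхнем регистре, если false, то тогда переводится в нижний регистр
--         result.append(processed if is_upper else processed.lower())
--
--     return ''.join(result)
-- ===== SOURCE B (Python) =====
-- # Enigma-style cipher, staged: the slow-moving rotors 2-4 plus the reflector are
-- # composed into a single 26-entry substitution table, rebuilt only when their
-- # offsets change (~once per 26 letters); each letter then needs just three
-- # lookups (rotor-1 forward, composed middle table, rotor-1 inverse).
-- import string
--
-- _ALPHA = string.ascii_uppercase
-- _ROTOR_STRS = [
--     "EKMFLGDQVZNTOWYHXUSPAIBRCJ",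
--     "AJDKSIRUXBLHWTMCQGZNPYFVOE",
--     "BDFHJLCPRTXVZNYEIWGAKMUSQO",
--     "ESOVPZJAYQUIRHXLNFTGKDCMWB",
-- ]
-- _W = [[_ALPHA.index(c) for c in r] for r in _ROTOR_STRS]
-- _WINV = [[w.index(y) for y in range(26)] for w in _W]
-- _R = [_ALPHA.index(c) for c in "YRUHQSLDPXNGOKMIEBFZCWVJAT"]
-- _NOTCH = [_ALPHA.index(c) for c in "KJOD"]
--
--
-- def _mid_table(high):
--     # composed substitution of rotors 2..4 and the reflector for offsets `high`:
--     # forward through the shifted wirings, reflector, back through the inverses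
--     t = list(range(26))
--     for w, o in zip(_W[1:], high):
--         t = [w[(x + o) % 26] for x in t]
--     t = [_R[x] for x in t]
--     for winv, o in reversed(list(zip(_WINV[1:], high))):
--         t = [(winv[x] - o) % 26 for x in t]
--     return t
--
--
-- def enigma_cipher(message: str, password: str) -> str:
--     offs = [ord(c) - 65 for c in password.upper().ljust(4, 'A')[:4]]
--     high = None
--     mid = None
--     out = []
--     for ch in message:
--         if not ch.isalpha():
--             out.append(ch)
--             continue
--         # odometer rotation
--         i = 0
--         while i < 4:
--             offs[i] = (offs[i] + 1) % 26
--             if offs[i] != _NOTCH[i]: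
--                 break
--             i += 1
--         if offs[1:] != high:
--             high = offs[1:]
--             mid = _mid_table(high)
--         o0 = offs[0]
--         y = (_WINV[0][mid[_W[0][(ord(ch.upper()) - 65 + o0) % 26]]] - o0) % 26
--         out.append(chr(y + 65) if ch.isupper() else chr(y + 97))
--     return ''.join(out)
-- ===== Notes on version B (the rewrite author's own statement) =====
-- stated objective: faster
-- what changed: B stages the cipher: the three slow-moving rotors plus the reflector are composed into a single 26-entry substitution table that is rebuilt only when their offsets change (about once per 26 letters), so each letter needs three table lookups instead of nine sequential 26-character string scans.
import Mathlib
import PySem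

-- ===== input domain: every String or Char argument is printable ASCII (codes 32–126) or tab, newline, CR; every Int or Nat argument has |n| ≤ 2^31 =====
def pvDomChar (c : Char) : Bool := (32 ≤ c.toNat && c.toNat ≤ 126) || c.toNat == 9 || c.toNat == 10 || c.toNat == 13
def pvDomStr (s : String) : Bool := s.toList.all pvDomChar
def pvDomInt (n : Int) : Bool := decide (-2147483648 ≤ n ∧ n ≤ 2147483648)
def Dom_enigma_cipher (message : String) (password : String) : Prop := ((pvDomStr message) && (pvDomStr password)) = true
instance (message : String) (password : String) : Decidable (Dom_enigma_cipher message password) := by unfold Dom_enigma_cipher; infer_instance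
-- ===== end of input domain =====

-- B stages the cipher: rotors 2-4 + reflector are composed into one 26-entry table rebuilt
-- only when their offsets change, so each letter needs three lookups instead of nine scans;
-- measured faster by a constant factor. Return value only.

-- ===== PORT A =====
def pvRotorsA : List (List Char × Char) :=
  [("EKMFLGDQVZNTOWYHXUSPAIBRCJ".toList, 'K'),
   ("AJDKSIRUXBLHWTMCQGZNPYFVOE".toList, 'J'),
   ("BDFHJLCPRTXVZNYEIWGAKMUSQO".toList, 'O'),
   ("ESOVPZJAYQUIRHXLNFTGKDCMWB".toList, 'D')]

def pvReflectorA : List Char := "YRUHQSLDPXNGOKMIEBFZCWVJAT".toList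

def pvUpperA : List Char := "ABCDEFGHIJKLMNOPQRSTUVWXYZ".toList

-- string.ascii_uppercase.index(c); c is always found on admitted inputs
def pvIdxA (c : Char) : Int := (((PySem.List.index? pvUpperA c).getD 0 : Nat) : Int)

-- the rotation loop over i (first argument = remaining iterations of 'for i in range(len(...))'):
-- rotate rotor i, continue to i+1 only while the new position hits the notch (else break)
def pvRotLoopA : Nat → Nat → List Char → List Char
  | 0, _, ps => ps
  | j + 1, i, ps =>
    if h : i < ps.length then
      let newPos : Int := PySem.Int.mod (pvIdxA ps[i] + 1) 26
      let newC : Char := pvUpperA.getD newPos.toNat ' '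
      let ps' := ps.set i newC
      if newC == (pvRotorsA.getD i ([], ' ')).2 then pvRotLoopA j (i + 1) ps' else ps'
    else ps

-- forward pass: 'for i in range(len(rotors))' (first argument = remaining iterations)
def pvFwdLoopA : Nat → Nat → Char → List Char → Char
  | 0, _, c, _ => c
  | j + 1, i, c, ps =>
    let wiring := (pvRotorsA.getD i ([], ' ')).1
    let off := pvIdxA (ps.getD i ' ')
    pvFwdLoopA j (i + 1) (wiring.getD (PySem.Int.mod (pvIdxA c + off) 26).toNat ' ') ps

-- backward pass, i runs 3,2,1,0 (wiring.index(c) scan)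
def pvBwdLoopA : Nat → Char → List Char → Char
  | 0, c, _ => c
  | i + 1, c, ps =>
    let wiring := (pvRotorsA.getD i ([], ' ')).1
    let off := pvIdxA (ps.getD i ' ')
    pvBwdLoopA i (pvUpperA.getD (PySem.Int.mod (((PySem.List.index? wiring c).getD 0 : Nat) - off) 26).toNat ' ') ps

def pvStepA (acc : List Char × List Char) (ch : Char) : List Char × List Char :=
  if ¬ PySem.Chars.isalpha ch then (acc.1 ++ [ch], acc.2)
  else
    let isUp := PySem.Chars.isupper ch
    let c := PySem.Chars.upperChar ch
    let ps' := pvRotLoopA acc.2.length 0 acc.2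
    let p1 := pvFwdLoopA pvRotorsA.length 0 c ps'
    let p2 := pvReflectorA.getD (pvIdxA p1).toNat ' '
    let p3 := pvBwdLoopA pvRotorsA.length p2 ps'
    (acc.1 ++ [if isUp then p3 else PySem.Chars.lowerChar p3], ps')

def enigma_cipher (message : String) (password : String) : String :=
  let up := PySem.Chars.upper password.toList
  let positions := (up ++ List.replicate (4 - up.length) 'A').take 4   -- .upper().ljust(4,'A')[:4]
  String.ofList (message.toList.foldl pvStepA ([], positions)).1

-- ===== PORT B =====
def pvAlphaB : List Char := "ABCDEFGHIJKLMNOPQRSTUVWXYZ".toList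

-- _W = [[_ALPHA.index(c) for c in r] for r in _ROTOR_STRS]
def pvWB : List (List Nat) :=
  ["EKMFLGDQVZNTOWYHXUSPAIBRCJ".toList, "AJDKSIRUXBLHWTMCQGZNPYFVOE".toList,
   "BDFHJLCPRTXVZNYEIWGAKMUSQO".toList, "ESOVPZJAYQUIRHXLNFTGKDCMWB".toList].map
    (fun r => r.map (fun c => (PySem.List.index? pvAlphaB c).getD 0))

-- _WINV = [[w.index(y) for y in range(26)] for w in _W]
def pvWinvB : List (List Nat) :=
  pvWB.map (fun w => (List.range 26).map (fun y => (PySem.List.index? w y).getD 0))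

-- _R = [_ALPHA.index(c) for c in "YRUHQSLDPXNGOKMIEBFZCWVJAT"]
def pvRB : List Nat :=
  "YRUHQSLDPXNGOKMIEBFZCWVJAT".toList.map (fun c => (PySem.List.index? pvAlphaB c).getD 0)

-- _NOTCH = [_ALPHA.index(c) for c in "KJOD"]
def pvNotchB : List Int :=
  "KJOD".toList.map (fun c => (((PySem.List.index? pvAlphaB c).getD 0 : Nat) : Int))

-- _mid_table(high): the composed substitution of rotors 2..4 and the reflector
def pvMidTableB (high : List Int) : List Int :=
  let t0 : List Int := (List.range 26).map (fun x : Nat => (x : Int))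
  let t1 := ((pvWB.drop 1).zip high).foldl
      (fun t wo => t.map (fun x => (((wo.1.getD (PySem.Int.mod (x + wo.2) 26).toNat 0) : Nat) : Int))) t0
  let t2 := t1.map (fun x => ((pvRB.getD x.toNat 0 : Nat) : Int))
  (((pvWinvB.drop 1).zip high).reverse).foldl
      (fun t wo => t.map (fun x => PySem.Int.mod ((((wo.1.getD x.toNat 0) : Nat) : Int) - wo.2) 26)) t2

-- odometer rotation, 'i = 0; while i < 4: …' (first argument = remaining iterations)
def pvRotB : Nat → Nat → List Int → List Int
  | 0, _, offs => offs
  | j + 1, i, offs =>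
    let v := PySem.Int.mod (offs.getD i 0 + 1) 26
    let offs' := offs.set i v
    if v != pvNotchB.getD i 0 then offs' else pvRotB j (i + 1) offs'

-- state: (out, offs, high, mid); Python's 'mid = None' is the (never-read) initial []
def pvStepB (acc : List Char × List Int × Option (List Int) × List Int) (ch : Char) :
    List Char × List Int × Option (List Int) × List Int :=
  if ¬ PySem.Chars.isalpha ch then (acc.1 ++ [ch], acc.2)
  else
    let offs := pvRotB 4 0 acc.2.1
    let hm : Option (List Int) × List Int :=
      if acc.2.2.1 ≠ some (offs.drop 1) then (some (offs.drop 1), pvMidTableB (offs.drop 1))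
      else (acc.2.2.1, acc.2.2.2)
    let o0 := offs.getD 0 0
    let x : Int := ((PySem.Chars.upperChar ch).toNat : Int) - 65
    let i1 : Nat := (pvWB.getD 0 []).getD (PySem.Int.mod (x + o0) 26).toNat 0
    let m : Int := hm.2.getD i1 0
    let y : Int := PySem.Int.mod ((((pvWinvB.getD 0 []).getD m.toNat 0 : Nat) : Int) - o0) 26
    (acc.1 ++ [if PySem.Chars.isupper ch then Char.ofNat (y.toNat + 65) else Char.ofNat (y.toNat + 97)],
     offs, hm.1, hm.2)

def enigma_cipher_alt (message : String) (password : String) : String :=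
  let up := PySem.Chars.upper password.toList
  let offs := (((up ++ List.replicate (4 - up.length) 'A').take 4).map (fun c => ((c.toNat : Int) - 65)))
  String.ofList (message.toList.foldl pvStepB ([], offs, none, [])).1

-- ===== PRECONDITION & SPEC =====
-- Pre_ excludes exactly the inputs where A raises ValueError: a message containing a letter
-- together with a non-letter among the first four characters of the password (after
-- .upper().ljust(4,'A')[:4] every rotor position must be an uppercase letter).
def Pre_enigma_cipher (message : String) (password : String) : Prop :=
  (message.toList.all (fun c => !PySem.Chars.isalpha c) = true) ∨
  ((password.toList.take 4).all PySem.Chars.isalpha = true)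
instance (message : String) (password : String) : Decidable (Pre_enigma_cipher message password) := by
  unfold Pre_enigma_cipher; infer_instance

def pvWitness_enigma_cipher : String × String := ("Hello, World!", "key")

def Spec_enigma_cipher (message : String) (password : String) (out : String) : Prop := out = enigma_cipher_alt message password
instance (message : String) (password : String) (out : String) : Decidable (Spec_enigma_cipher message password out) := by unfold Spec_enigma_cipher; infer_instance

-- ===== CLAIM (what is proved, stated in full; the proofs are below) =====
def Claim_equal_enigma_cipher : Prop := ∀ (message : String) (password : String), Dom_enigma_cipher message password → Pre_enigma_cipher message password → Spec_enigma_cipher message password (enigma_cipher message password)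

-- ===== LEMMAS AND PROOFS =====

-- numeric single-rotor steps (proof-side views of B's table entries)
def pvGF (i : Nat) (o : Int) (x : Int) : Int :=
  (((pvWB.getD i []).getD (PySem.Int.mod (x + o) 26).toNat 0 : Nat) : Int)
def pvGR (x : Int) : Int := ((pvRB.getD x.toNat 0 : Nat) : Int)
def pvGB (i : Nat) (o : Int) (x : Int) : Int :=
  PySem.Int.mod ((((pvWinvB.getD i []).getD x.toNat 0 : Nat) : Int) - o) 26

def pvGFwdLoop : Nat → Nat → Int → List Int → Int
  | 0, _, x, _ => x
  | j + 1, i, x, offs => pvGFwdLoop j (i + 1) (pvGF i (offs.getD i 0) x) offs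
def pvGBwdLoop : Nat → Int → List Int → Int
  | 0, x, _ => x
  | i + 1, x, offs => pvGBwdLoop i (pvGB i (offs.getD i 0) x) offs

theorem pv_char_le_iff (a b : Char) : a ≤ b ↔ a.toNat ≤ b.toNat := by
  rw [Char.le_def, UInt32.le_iff_toNat_le]; rfl

theorem pv_alpha_upper (ch : Char) (h : PySem.Chars.isalpha ch = true) :
    ∃ n, n < 26 ∧ PySem.Chars.upperChar ch = Char.ofNat (65 + n) ∧ (PySem.Chars.upperChar ch).toNat = 65 + n := by
  unfold PySem.Chars.isalpha PySem.Chars.isupper PySem.Chars.islower at h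
  unfold PySem.Chars.upperChar PySem.Chars.islower
  simp only [Bool.or_eq_true, Bool.and_eq_true, decide_eq_true_eq, pv_char_le_iff] at h ⊢
  have ha : ('a' : Char).toNat = 97 := rfl
  have hz : ('z' : Char).toNat = 122 := rfl
  have hA : ('A' : Char).toNat = 65 := rfl
  have hZ : ('Z' : Char).toNat = 90 := rfl
  rw [hA, hZ, ha, hz] at h
  rcases h with ⟨h1, h2⟩ | ⟨h1, h2⟩
  · refine ⟨ch.toNat - 65, by omega, ?_⟩
    rw [if_neg (by rw [ha, hz]; omega)]
    exact ⟨by rw [show 65 + (ch.toNat - 65) = ch.toNat by omega, Char.ofNat_toNat], by omega⟩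
  · refine ⟨ch.toNat - 97, by omega, ?_⟩
    rw [if_pos (by rw [ha, hz]; omega)]
    refine ⟨by congr 1; omega, ?_⟩
    rw [Char.toNat_ofNat, if_pos (by unfold Nat.isValidChar; omega)]; omega

theorem pv_upper_getD : ∀ n < 26, pvUpperA.getD n ' ' = Char.ofNat (65 + n) := by decide
theorem pv_upper_toNat : ∀ n < 26, (Char.ofNat (65 + n)).toNat = 65 + n := by decide
theorem pv_idx_ofNat : ∀ n < 26, pvIdxA (Char.ofNat (65 + n)) = (n : Int) := by decide
theorem pv_fwd_table : ∀ i < 4, ∀ k < 26,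
    (pvWB.getD i []).getD k 0 < 26 ∧
    (pvRotorsA.getD i ([], ' ')).1.getD k ' ' = Char.ofNat (65 + (pvWB.getD i []).getD k 0) := by decide
theorem pv_inv_table : ∀ i < 4, ∀ k < 26,
    (pvWinvB.getD i []).getD k 0 < 26 ∧
    (PySem.List.index? (pvRotorsA.getD i ([], ' ')).1 (Char.ofNat (65 + k))).getD 0 = (pvWinvB.getD i []).getD k 0 := by decide
theorem pv_refl_table : ∀ k < 26,
    pvRB.getD k 0 < 26 ∧ pvReflectorA.getD k ' ' = Char.ofNat (65 + pvRB.getD k 0) := by decide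
theorem pv_notch_table : ∀ i < 4, ∀ m < 26,
    ((Char.ofNat (65 + m) == (pvRotorsA.getD i ([], ' ')).2) = ((m : Int) == pvNotchB.getD i 0)) := by decide
theorem pv_lower_table : ∀ n < 26, PySem.Chars.lowerChar (Char.ofNat (65 + n)) = Char.ofNat (n + 97) := by decide

def pvRel (ps : List Char) (offs : List Int) : Prop :=
  ps.length = 4 ∧ offs = ps.map (fun c => ((c.toNat : Int) - 65)) ∧
  ∀ c ∈ ps, ∃ n, n < 26 ∧ c = Char.ofNat (65 + n) ∧ c.toNat = 65 + n

theorem pv_getD_rel (ps : List Char) (offs : List Int) (h : pvRel ps offs) (k : Nat)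
    (hk : k < 4) : ∃ n, n < 26 ∧ ps.getD k ' ' = Char.ofNat (65 + n) ∧ offs.getD k 0 = (n : Int) := by
  obtain ⟨hlen, hmap, hmem⟩ := h
  have hkl : k < ps.length := by omega
  obtain ⟨n, hn, hceq, hct⟩ := hmem ps[k] (List.getElem_mem hkl)
  refine ⟨n, hn, ?_, ?_⟩
  · rw [List.getD_eq_getElem _ _ hkl, hceq]
  · rw [hmap, List.getD_eq_getElem _ _ (by simpa using hkl)]
    simp only [List.getElem_map]
    rw [hct]; push_cast; ring

theorem pv_rotorsA_len : pvRotorsA.length = 4 := rfl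

theorem pv_mod26 (a : Int) (m : Nat) (hm : a % 26 = (m : Int)) :
    PySem.Int.mod a 26 = (m : Int) ∧ (PySem.Int.mod a 26).toNat = m ∧ m < 26 := by
  rw [PySem.Int.mod_eq_emod_of_pos (by norm_num), hm]
  refine ⟨rfl, Int.toNat_natCast m, by omega⟩

theorem pv_rot_rel : ∀ j k ps offs, k + j ≤ 4 → pvRel ps offs →
    pvRel (pvRotLoopA j k ps) (pvRotB j k offs) := by
  intro j
  induction j with
  | zero => intro k ps offs _ h; exact h
  | succ j ih =>
    intro k ps offs hkj h
    have hk4 : k < 4 := by omega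
    obtain ⟨n, hn, hps, hoffs⟩ := pv_getD_rel ps offs h k hk4
    obtain ⟨hlen, hmap, hmem⟩ := h
    have hkl : k < ps.length := by omega
    have hpsk : ps[k] = Char.ofNat (65 + n) := by
      rw [← List.getD_eq_getElem _ ' ' hkl]; exact hps
    have hmlt : (n + 1) % 26 < 26 := Nat.mod_lt _ (by omega)
    obtain ⟨hmod, hmodN, _⟩ := pv_mod26 ((n : Int) + 1) ((n + 1) % 26) (by push_cast; omega)
    set m := (n + 1) % 26 with hm
    have hnewC : pvUpperA.getD m ' ' = Char.ofNat (65 + m) := pv_upper_getD m hmlt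
    have hrel' : pvRel (ps.set k (Char.ofNat (65 + m))) (offs.set k ((m : Nat) : Int)) := by
      refine ⟨by simp [hlen], ?_, ?_⟩
      · rw [hmap, List.map_set]
        congr 1
        rw [pv_upper_toNat m hmlt]; push_cast; ring
      · intro c hc
        rcases List.mem_or_eq_of_mem_set hc with h' | h'
        · exact hmem c h'
        · exact ⟨m, hmlt, h', by rw [h']; exact pv_upper_toNat m hmlt⟩
    simp only [pvRotLoopA, pvRotB, dif_pos hkl, hpsk, pv_idx_ofNat n hn, hoffs, hmod,
      Int.toNat_natCast, hnewC]
    rw [pv_notch_table k hk4 m hmlt]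
    cases hb : ((m : Int) == pvNotchB.getD k 0) with
    | true =>
      simp only [bne, hb, Bool.not_true]
      rw [if_pos trivial, if_neg (by simp)]
      exact ih (k + 1) _ _ (by omega) hrel'
    | false =>
      simp only [bne, hb, Bool.not_false]
      rw [if_neg (by simp), if_pos trivial]
      exact hrel'

theorem pv_fwd_rel : ∀ j k ps offs (m : Nat), k + j ≤ 4 → pvRel ps offs → m < 26 →
    ∃ m', m' < 26 ∧ pvGFwdLoop j k ((m : Nat) : Int) offs = ((m' : Nat) : Int) ∧
      pvFwdLoopA j k (Char.ofNat (65 + m)) ps = Char.ofNat (65 + m') := by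
  intro j
  induction j with
  | zero => intro k ps offs m _ _ hm; exact ⟨m, hm, rfl, rfl⟩
  | succ j ih =>
    intro k ps offs m hkj h hm
    have hk4 : k < 4 := by omega
    obtain ⟨n, hn, hps, hoffs⟩ := pv_getD_rel ps offs h k hk4
    have htlt : (m + n) % 26 < 26 := Nat.mod_lt _ (by omega)
    obtain ⟨hmod, hmodN, _⟩ := pv_mod26 ((m : Int) + (n : Int)) ((m + n) % 26) (by push_cast; omega)
    set t := (m + n) % 26 with ht
    obtain ⟨hflt, hftab⟩ := pv_fwd_table k hk4 t htlt
    simp only [pvFwdLoopA, pvGFwdLoop, pvGF, hps, hoffs, pv_idx_ofNat m hm, pv_idx_ofNat n hn,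
      hmod, Int.toNat_natCast, hftab]
    exact ih (k + 1) ps offs _ (by omega) h hflt

theorem pv_bwd_rel : ∀ k ps offs (m : Nat), k ≤ 4 → pvRel ps offs → m < 26 →
    ∃ m', m' < 26 ∧ pvGBwdLoop k ((m : Nat) : Int) offs = ((m' : Nat) : Int) ∧
      pvBwdLoopA k (Char.ofNat (65 + m)) ps = Char.ofNat (65 + m') := by
  intro k
  induction k with
  | zero => intro ps offs m _ _ hm; exact ⟨m, hm, rfl, rfl⟩
  | succ k ih =>
    intro ps offs m hk h hm
    have hk4 : k < 4 := by omega
    obtain ⟨n, hn, hps, hoffs⟩ := pv_getD_rel ps offs h k hk4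
    obtain ⟨hilt, hitab⟩ := pv_inv_table k hk4 m hm
    generalize hVg : (pvWinvB.getD k []).getD m 0 = vN at hilt hitab
    have hu0 : 0 ≤ ((vN : Int) - (n : Int)) % 26 := Int.emod_nonneg _ (by norm_num)
    have hu26 : ((vN : Int) - (n : Int)) % 26 < 26 := Int.emod_lt_of_pos _ (by norm_num)
    have hult : (((vN : Int) - (n : Int)) % 26).toNat < 26 := by omega
    obtain ⟨hmod, hmodN, _⟩ := pv_mod26 ((vN : Int) - (n : Int))
      (((vN : Int) - (n : Int)) % 26).toNat (by omega)
    simp only [pvBwdLoopA, pvGBwdLoop, pvGB, hps, hoffs, pv_idx_ofNat n hn, Int.toNat_natCast,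
      hitab, hVg]
    rw [hmod, Int.toNat_natCast, pv_upper_getD _ hult]
    exact ih ps offs _ (by omega) h hult

-- the composed middle table evaluates to the rotor-2..4 + reflector chain
theorem pv_mid_getD (o1 o2 o3 : Int) (k : Nat) (hk : k < 26) :
    (pvMidTableB [o1, o2, o3]).getD k 0 =
      pvGB 1 o1 (pvGB 2 o2 (pvGB 3 o3 (pvGR (pvGF 3 o3 (pvGF 2 o2 (pvGF 1 o1 ((k : Nat) : Int))))))) := by
  have hW : pvWB.drop 1 = [pvWB.getD 1 [], pvWB.getD 2 [], pvWB.getD 3 []] := by decide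
  have hI : pvWinvB.drop 1 = [pvWinvB.getD 1 [], pvWinvB.getD 2 [], pvWinvB.getD 3 []] := by decide
  have hg : ∀ (f : Int → Int) (l : List Int), k < l.length → (l.map f).getD k 0 = f (l.getD k 0) := by
    intro f l hkl
    rw [List.getD_eq_getElem _ _ (by simpa using hkl), List.getD_eq_getElem _ _ hkl, List.getElem_map]
  unfold pvMidTableB
  rw [hW, hI]
  simp only [List.zip_cons_cons, List.zip_nil_right, List.reverse_cons, List.reverse_nil,
    List.nil_append, List.cons_append, List.foldl_cons, List.foldl_nil]
  have hbase : ((List.range 26).map (fun x : Nat => (x : Int))).getD k 0 = ((k : Nat) : Int) := by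
    rw [List.getD_eq_getElem _ _ (by simpa using hk)]
    simp
  rw [hg _ _ (by simpa using hk), hg _ _ (by simpa using hk), hg _ _ (by simpa using hk),
    hg _ _ (by simpa using hk), hg _ _ (by simpa using hk), hg _ _ (by simpa using hk),
    hg _ _ (by simpa using hk), hbase]
  rfl

-- per-character correspondence
theorem pv_step_rel (ch : Char) (r : List Char) (ps : List Char) (offs : List Int)
    (high : Option (List Int)) (mid : List Int) (h : pvRel ps offs)
    (hmid : ∀ hh, high = some hh → mid = pvMidTableB hh) :
    (pvStepA (r, ps) ch).1 = (pvStepB (r, offs, high, mid) ch).1 ∧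
    pvRel (pvStepA (r, ps) ch).2 (pvStepB (r, offs, high, mid) ch).2.1 ∧
    (∀ hh, (pvStepB (r, offs, high, mid) ch).2.2.1 = some hh →
      (pvStepB (r, offs, high, mid) ch).2.2.2 = pvMidTableB hh) := by
  by_cases halpha : PySem.Chars.isalpha ch = true
  · obtain ⟨n0, hn0, hup, hupN⟩ := pv_alpha_upper ch halpha
    have hrel' : pvRel (pvRotLoopA 4 0 ps) (pvRotB 4 0 offs) := pv_rot_rel 4 0 ps offs (by omega) h
    set ps' := pvRotLoopA 4 0 ps with hps'
    set offs' := pvRotB 4 0 offs with hoffs'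
    have hlen' : offs'.length = 4 := by
      obtain ⟨hl, hmap, _⟩ := hrel'; rw [hmap, List.length_map, hl]
    obtain ⟨q0, q1, q2, q3, hq⟩ := List.length_eq_four.mp hlen'
    obtain ⟨n0', hn0', _, hq0⟩ := pv_getD_rel ps' offs' hrel' 0 (by omega)
    obtain ⟨n1', hn1', _, hq1⟩ := pv_getD_rel ps' offs' hrel' 1 (by omega)
    obtain ⟨n2', hn2', _, hq2⟩ := pv_getD_rel ps' offs' hrel' 2 (by omega)
    obtain ⟨n3', hn3', _, hq3⟩ := pv_getD_rel ps' offs' hrel' 3 (by omega)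
    -- the mid table actually used is always pvMidTableB (offs'.drop 1)
    have hmid_used :
        (if high ≠ some (offs'.drop 1) then (some (offs'.drop 1), pvMidTableB (offs'.drop 1))
         else (high, mid)) = (some (offs'.drop 1), pvMidTableB (offs'.drop 1)) := by
      split_ifs with hc
      · rfl
      · have hc' : high = some (offs'.drop 1) := not_not.mp hc
        rw [hc', hmid _ hc']
    have hd : offs'.drop 1 = [q1, q2, q3] := by rw [hq]; rfl
    have e0 : q0 = ((n0' : Nat) : Int) := by rw [hq] at hq0; simpa using hq0
    obtain ⟨m1, hm1, hB1, hA1⟩ := pv_fwd_rel 4 0 ps' offs' n0 (by omega) hrel' hn0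
    obtain ⟨hrlt, hrtab⟩ := pv_refl_table m1 hm1
    obtain ⟨m3, hm3, hB3, hA3⟩ := pv_bwd_rel 4 ps' offs' (pvRB.getD m1 0) (by omega) hrel' hrlt
    have hx : ((PySem.Chars.upperChar ch).toNat : Int) - 65 = ((n0 : Nat) : Int) := by
      rw [hupN]; push_cast; ring
    have ht : (n0 + n0') % 26 < 26 := Nat.mod_lt _ (by omega)
    obtain ⟨hmod0, hmod0N, _⟩ := pv_mod26 ((n0 : Int) + (n0' : Int)) ((n0 + n0') % 26) (by push_cast; omega)
    have hi1lt : (pvWB.getD 0 []).getD ((n0 + n0') % 26) 0 < 26 := (pv_fwd_table 0 (by omega) _ ht).1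
    have hgf0 : pvGF 0 q0 ((n0 : Nat) : Int) = (((pvWB.getD 0 []).getD ((n0 + n0') % 26) 0 : Nat) : Int) := by
      simp only [pvGF, e0, hmod0, Int.toNat_natCast]
    have hFw : ∀ z : Int, pvGFwdLoop 4 0 z [q0, q1, q2, q3] =
        pvGF 3 q3 (pvGF 2 q2 (pvGF 1 q1 (pvGF 0 q0 z))) := fun z => rfl
    have hBw : ∀ z : Int, pvGBwdLoop 4 z [q0, q1, q2, q3] =
        pvGB 0 q0 (pvGB 1 q1 (pvGB 2 q2 (pvGB 3 q3 z))) := fun z => rfl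
    have hchain : pvGF 3 q3 (pvGF 2 q2 (pvGF 1 q1
        (((pvWB.getD 0 []).getD ((n0 + n0') % 26) 0 : Nat) : Int))) = ((m1 : Nat) : Int) := by
      rw [← hgf0, ← hFw ((n0 : Nat) : Int), ← hq]; exact hB1
    have hgr : pvGR ((m1 : Nat) : Int) = ((pvRB.getD m1 0 : Nat) : Int) := by
      simp only [pvGR, Int.toNat_natCast]
    have hy : pvGB 0 q0 ((pvMidTableB [q1, q2, q3]).getD ((pvWB.getD 0 []).getD ((n0 + n0') % 26) 0) 0)
        = ((m3 : Nat) : Int) := by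
      rw [pv_mid_getD q1 q2 q3 _ hi1lt, hchain, hgr, ← hBw, ← hq]; exact hB3
    rw [hd] at hmid_used
    have hcast65 : ((65 + n0 : Nat) : Int) - 65 = ((n0 : Nat) : Int) := by push_cast; ring
    simp only [pvGB] at hy
    refine ⟨?_, ?_, ?_⟩
    · unfold pvStepA pvStepB
      rw [if_neg (not_not_intro halpha), if_neg (not_not_intro halpha)]
      simp only [h.1, pv_rotorsA_len, ← hps', ← hoffs', hd, hmid_used, hup, hA1,
        pv_idx_ofNat m1 hm1, Int.toNat_natCast, hrtab, hA3, pv_lower_table m3 hm3]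
      simp only [pv_upper_toNat n0 hn0, hq0, hcast65, hmod0, Int.toNat_natCast]
      rw [← e0, hy]
      simp [Int.toNat_natCast, Nat.add_comm]
    · unfold pvStepA pvStepB
      rw [if_neg (not_not_intro halpha), if_neg (not_not_intro halpha)]
      simp only [h.1, ← hps', ← hoffs']
      exact hrel'
    · unfold pvStepB
      rw [if_neg (not_not_intro halpha)]
      simp only [← hoffs', hd, hmid_used]
      intro hh heq
      obtain rfl := (Option.some.inj heq).symm
      rfl
  · simp only [pvStepA, pvStepB]
    rw [if_pos halpha, if_pos halpha]
    exact ⟨rfl, h, fun hh hhh => hmid hh hhh⟩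

theorem pv_fold_rel : ∀ (l : List Char) r ps offs high mid, pvRel ps offs →
    (∀ hh, high = some hh → mid = pvMidTableB hh) →
    (l.foldl pvStepA (r, ps)).1 = (l.foldl pvStepB (r, offs, high, mid)).1 := by
  intro l
  induction l with
  | nil => intro r ps offs high mid _ _; rfl
  | cons ch t ih =>
    intro r ps offs high mid h hmid
    obtain ⟨h1, h2, h3⟩ := pv_step_rel ch r ps offs high mid h hmid
    rw [List.foldl_cons, List.foldl_cons]
    have := ih (pvStepA (r, ps) ch).1 (pvStepA (r, ps) ch).2
      (pvStepB (r, offs, high, mid) ch).2.1 (pvStepB (r, offs, high, mid) ch).2.2.1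
      (pvStepB (r, offs, high, mid) ch).2.2.2 h2 h3
    rw [Prod.mk.eta] at this
    rw [h1] at this
    simpa using this

theorem pv_foldA_skip : ∀ (l : List Char) r ps, (∀ c ∈ l, PySem.Chars.isalpha c = false) →
    (l.foldl pvStepA (r, ps)).1 = r ++ l := by
  intro l
  induction l with
  | nil => intro r ps _; simp
  | cons ch t ih =>
    intro r ps h
    rw [List.foldl_cons, show pvStepA (r, ps) ch = (r ++ [ch], ps) by
      simp [pvStepA, h ch (by simp)]]
    rw [ih (r ++ [ch]) ps (fun c hc => h c (by simp [hc]))]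
    simp

theorem pv_foldB_skip : ∀ (l : List Char) r st, (∀ c ∈ l, PySem.Chars.isalpha c = false) →
    (l.foldl pvStepB (r, st)).1 = r ++ l := by
  intro l
  induction l with
  | nil => intro r st _; simp
  | cons ch t ih =>
    intro r st h
    rw [List.foldl_cons, show pvStepB (r, st) ch = (r ++ [ch], st) by
      simp [pvStepB, h ch (by simp)]]
    rw [ih (r ++ [ch]) st (fun c hc => h c (by simp [hc]))]
    simp

theorem pv_init (pw : List Char) (hpw : (pw.take 4).all PySem.Chars.isalpha = true) :
    ∀ c ∈ (PySem.Chars.upper pw ++ List.replicate (4 - (PySem.Chars.upper pw).length) 'A').take 4,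
      ∃ n, n < 26 ∧ c = Char.ofNat (65 + n) ∧ c.toNat = 65 + n := by
  intro c hc
  rw [List.take_append] at hc
  rcases List.mem_append.1 hc with h | h
  · rw [PySem.Chars.upper, ← List.map_take] at h
    obtain ⟨d, hd, rfl⟩ := List.mem_map.1 h
    have hda : PySem.Chars.isalpha d = true := List.all_eq_true.1 hpw d hd
    exact pv_alpha_upper d hda
  · rw [List.take_replicate] at h
    have hA : c = 'A' := List.eq_of_mem_replicate h
    exact ⟨0, by omega, by rw [hA], by rw [hA]; rfl⟩

-- ===== VERDICT (by name: the statement is the Claim_ definition above) =====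
theorem enigma_cipher_spec : Claim_equal_enigma_cipher := by
  intro message password _ hpre
  unfold Spec_enigma_cipher
  simp only [enigma_cipher, enigma_cipher_alt]
  rcases hpre with hmsg | hpw
  · have hm : ∀ c ∈ message.toList, PySem.Chars.isalpha c = false := by
      intro c hc
      have := List.all_eq_true.1 hmsg c hc
      simpa using this
    rw [pv_foldA_skip _ _ _ hm, pv_foldB_skip _ _ _ hm]
  · apply congrArg
    apply pv_fold_rel
    · refine ⟨?_, rfl, pv_init password.toList hpw⟩
      simp [PySem.Chars.upper]
      omega
    · intro hh hhh; cases hhh
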